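-- pv_equiv track=rewrite | github.com/thales-must/citation-score | scholar.py | min_coauthor_distance
-- ===== SOURCE A (Python) =====
-- from collections import deque
-- from typing import Any, Dict, List, Optional, Set, Tuple
--
-- def min_coauthor_distance(
--
--     citing_authors: Set[str],
--     cited_authors: Set[str],
--     graph: Dict[str, Set[str]],
--     max_depth: int = 3,
-- ) -> int:
--     """
--     BFS 计算最短作者距离
--     """
--     queue = deque()
--     visited: Set[str] = set()
--
--     for a in citing_authors:
--         queue.append((a, 0))
--         visited.add(a)
--
--     while queue:
--         current, depth = queue.popleft()
--
--         if depth > max_depth: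
--             break
--
--         if current in cited_authors:
--             return depth
--
--         for neighbor in graph.get(current, []):
--             if neighbor not in visited:
--                 visited.add(neighbor)
--                 queue.append((neighbor, depth + 1))
--
--     return max_depth + 1
-- ===== SOURCE B (Python) =====
-- def min_coauthor_distance(citing_authors, cited_authors, graph, max_depth=3):
--     """Bounded transitive-closure iteration: no queue, no visited/frontier
--     bookkeeping -- grow the whole set of reachable authors one step per round
--     until it meets the cited set or reaches a fixpoint."""
--     reach = set(citing_authors)
--     for depth in range(max_depth + 1):
--         if reach & cited_authors:
--             return depth
--         new = reach | {nb for node in reach for nb in graph.get(node, [])}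
--         if new == reach:
--             return max_depth + 1
--         reach = new
--     return max_depth + 1
-- ===== Notes on version B (the rewrite author's own statement) =====
-- stated objective: alternative
-- what changed: Replaces A's queue-based BFS with a visited set and per-node depth pairs by a bounded transitive-closure iteration: keep one set of all authors reachable so far, expand the whole set by one graph step per round of a for-loop over range(max_depth+1), return the first round whose set intersects the cited set, and stop at a fixpoint; no queue, no visited/frontier distinction, no per-node bookkeeping.
import Mathlib
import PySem

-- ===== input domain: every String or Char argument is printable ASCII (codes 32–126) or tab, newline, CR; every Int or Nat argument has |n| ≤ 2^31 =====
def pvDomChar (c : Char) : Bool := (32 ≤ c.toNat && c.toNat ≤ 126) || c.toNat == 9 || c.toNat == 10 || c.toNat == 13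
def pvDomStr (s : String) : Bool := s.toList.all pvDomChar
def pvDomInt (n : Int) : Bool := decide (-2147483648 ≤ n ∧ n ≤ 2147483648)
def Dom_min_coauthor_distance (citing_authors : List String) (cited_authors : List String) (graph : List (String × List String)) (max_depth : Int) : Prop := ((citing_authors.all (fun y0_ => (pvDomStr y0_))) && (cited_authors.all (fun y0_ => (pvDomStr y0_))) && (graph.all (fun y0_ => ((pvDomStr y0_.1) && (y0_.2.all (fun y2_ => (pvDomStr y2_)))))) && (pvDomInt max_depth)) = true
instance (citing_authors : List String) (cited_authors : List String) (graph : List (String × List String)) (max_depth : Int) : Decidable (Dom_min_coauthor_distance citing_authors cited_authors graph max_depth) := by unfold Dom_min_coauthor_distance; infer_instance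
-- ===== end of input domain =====

-- B replaces A's queue-based BFS (visited set + (node, depth) pairs) by a bounded
-- transitive-closure iteration over a single reachable set; objective: alternative algorithm.

-- ===== PORT A =====
-- helpers for A's port: the body of A's inner neighbour loop, and the lemmas aLoop's
-- termination measure needs (cited by name in 'decreasing_by').

/-- body of A's inner loop: `if neighbor not in visited: visited.add(neighbor); queue.append((neighbor, depth+1))` -/
def aNbrAdd (d : Int) (s : List (String × Int) × PySem.Set String) (nb : String) : List (String × Int) × PySem.Set String :=
  if PySem.Set.contains s.2 nb then s else (s.1 ++ [(nb, d + 1)], PySem.Set.add s.2 nb)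

/-- number of elements of `U` not yet visited (termination measure component) -/
def ucount (U : List String) (v : PySem.Set String) : Nat :=
  (U.filter (fun x => !(PySem.Set.contains v x))).length

lemma contains_add_self (v : PySem.Set String) (nb : String) :
    PySem.Set.contains (PySem.Set.add v nb) nb = true := by
  rw [PySem.Set.contains_iff]
  exact (PySem.Set.mem_add v nb nb).mpr (Or.inr rfl)

lemma contains_add_of_ne (v : PySem.Set String) (nb x : String) (h : x ≠ nb) :
    PySem.Set.contains (PySem.Set.add v nb) x = PySem.Set.contains v x := by
  apply Bool.eq_iff_iff.mpr
  rw [PySem.Set.contains_iff, PySem.Set.contains_iff, PySem.Set.mem_add]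
  constructor
  · rintro (h' | h')
    · exact h'
    · exact absurd h' h
  · exact Or.inl

lemma ucount_mono_add (U : List String) (v : PySem.Set String) (nb : String) :
    ucount U (PySem.Set.add v nb) ≤ ucount U v := by
  unfold ucount
  induction U with
  | nil => simp
  | cons x U ih =>
    rw [List.filter_cons, List.filter_cons]
    by_cases hx : x = nb
    · subst hx
      rw [show (!(PySem.Set.contains (PySem.Set.add v x) x)) = false from by
        rw [contains_add_self]; rfl]
      simp only [Bool.false_eq_true, if_false]
      split <;> (try simp only [List.length_cons]) <;> omega
    · rw [contains_add_of_ne v nb x hx]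
      split <;> (try simp only [List.length_cons]) <;> omega

lemma ucount_add_lt (U : List String) (v : PySem.Set String) (nb : String)
    (hU : nb ∈ U) (hv : PySem.Set.contains v nb = false) :
    ucount U (PySem.Set.add v nb) < ucount U v := by
  unfold ucount
  induction U with
  | nil => simp at hU
  | cons x U ih =>
    rw [List.filter_cons, List.filter_cons]
    by_cases hx : x = nb
    · subst hx
      rw [show (!(PySem.Set.contains (PySem.Set.add v x) x)) = false from by
        rw [contains_add_self]; rfl]
      rw [show (!(PySem.Set.contains v x)) = true from by rw [hv]; rfl]
      simp only [Bool.false_eq_true, if_false, if_true, List.length_cons]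
      have hmono := ucount_mono_add U v x
      unfold ucount at hmono
      omega
    · have hU' : nb ∈ U := by
        rcases List.mem_cons.mp hU with h | h
        · exact absurd h.symm hx
        · exact h
      have hih := ih hU'
      rw [contains_add_of_ne v nb x hx]
      split <;> (try simp only [List.length_cons]) <;> omega

lemma mem_getD_flatten (graph : List (String × List String)) (c nb : String)
    (h : nb ∈ (PySem.Dict.mk graph).getD c []) : nb ∈ (graph.map Prod.snd).flatten := by
  induction graph with
  | nil => simp [PySem.Dict.getD, PySem.Dict.get?] at h
  | cons p rest ih =>
    obtain ⟨k, vs⟩ := p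
    rw [show (PySem.Dict.mk ((k, vs) :: rest)).getD c [] =
        ((PySem.Dict.mk ((k, vs) :: rest)).get? c).getD [] from rfl,
      PySem.Dict.get?_mk_cons] at h
    simp only [List.map_cons, List.flatten_cons, List.mem_append]
    split at h
    · exact Or.inl h
    · exact Or.inr (ih h)

lemma aFold_measure (U ns : List String) (d : Int) (q : List (String × Int)) (v : PySem.Set String)
    (hU : ∀ nb ∈ ns, nb ∈ U) :
    (ns.foldl (aNbrAdd d) (q, v)).1.length + ucount U (ns.foldl (aNbrAdd d) (q, v)).2 ≤
      q.length + ucount U v := by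
  induction ns generalizing q v with
  | nil => simp
  | cons nb ns ih =>
    simp only [List.foldl_cons, aNbrAdd]
    rcases hc : PySem.Set.contains v nb with _ | _
    · simp only [Bool.false_eq_true, if_false]
      have ih' := ih (q ++ [(nb, d + 1)]) (PySem.Set.add v nb)
        (fun a ha => hU a (List.mem_cons_of_mem _ ha))
      have hlt := ucount_add_lt U v nb (hU nb List.mem_cons_self) hc
      simp only [List.length_append, List.length_cons, List.length_nil] at ih'
      omega
    · simp only [if_true]
      exact ih q v (fun a ha => hU a (List.mem_cons_of_mem _ ha))

/-- A's `while queue:` loop -/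
def aLoop (cited : List String) (graph : List (String × List String)) (maxd : Int)
    (q : List (String × Int)) (v : PySem.Set String) : Int :=
  match q with
  | [] => maxd + 1
  | (c, d) :: q' =>
    if d > maxd then maxd + 1
    else if cited.contains c then d
    else
      aLoop cited graph maxd
        (((PySem.Dict.mk graph).getD c []).foldl (aNbrAdd d) (q', v)).1
        (((PySem.Dict.mk graph).getD c []).foldl (aNbrAdd d) (q', v)).2
termination_by q.length + ucount ((graph.map Prod.snd).flatten) v
decreasing_by
  have h := aFold_measure ((graph.map Prod.snd).flatten) ((PySem.Dict.mk graph).getD c []) d q' v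
    (fun nb hnb => mem_getD_flatten graph c nb hnb)
  simp only [List.length_cons]
  omega

def min_coauthor_distance (citing_authors : List String) (cited_authors : List String) (graph : List (String × List String)) (max_depth : Int) : Int :=
  -- for a in citing_authors: queue.append((a, 0)); visited.add(a)
  aLoop cited_authors graph max_depth
    (citing_authors.foldl (fun s a => (s.1 ++ [(a, (0 : Int))], PySem.Set.add s.2 a)) ([], PySem.Set.empty)).1
    (citing_authors.foldl (fun s a => (s.1 ++ [(a, (0 : Int))], PySem.Set.add s.2 a)) ([], PySem.Set.empty)).2

-- ===== PORT B =====
/-- the set comprehension `{nb for node in reach for nb in graph.get(node, [])}`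
(built in `reach`'s stored order; only its member set is ever used) -/
def bNbrs (graph : List (String × List String)) (R : PySem.Set String) : PySem.Set String :=
  R.foldl (fun S node => PySem.Set.update S ((PySem.Dict.mk graph).getD node [])) PySem.Set.empty

/-- B's `for depth in range(max_depth + 1):` loop with early returns; the truthiness
test `if reach & cited_authors:` is `¬ (inter …).isEmpty`, and `new == reach` on
Python sets is `PySem.Set.equal` -/
def bLoop (cited : List String) (graph : List (String × List String)) (maxd : Int)
    (d : Int) (R : PySem.Set String) : Int :=
  if maxd + 1 ≤ d then maxd + 1
  else if (PySem.Set.inter R cited).isEmpty then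
    if PySem.Set.equal (PySem.Set.union R (bNbrs graph R)) R then maxd + 1
    else bLoop cited graph maxd (d + 1) (PySem.Set.union R (bNbrs graph R))
  else d
termination_by (maxd + 1 - d).toNat
decreasing_by omega

def min_coauthor_distance_alt (citing_authors : List String) (cited_authors : List String) (graph : List (String × List String)) (max_depth : Int) : Int :=
  bLoop cited_authors graph max_depth 0 (PySem.Set.ofList citing_authors)

-- ===== PRECONDITION & SPEC =====
def Spec_min_coauthor_distance (citing_authors : List String) (cited_authors : List String) (graph : List (String × List String)) (max_depth : Int) (out : Int) : Prop := out = min_coauthor_distance_alt citing_authors cited_authors graph max_depth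
instance (citing_authors : List String) (cited_authors : List String) (graph : List (String × List String)) (max_depth : Int) (out : Int) : Decidable (Spec_min_coauthor_distance citing_authors cited_authors graph max_depth out) := by unfold Spec_min_coauthor_distance; infer_instance

-- ===== CLAIM (what is proved, stated in full; the proofs are below) =====
def Claim_equal_min_coauthor_distance : Prop := ∀ (citing_authors : List String) (cited_authors : List String) (graph : List (String × List String)) (max_depth : Int), Dom_min_coauthor_distance citing_authors cited_authors graph max_depth → Spec_min_coauthor_distance citing_authors cited_authors graph max_depth (min_coauthor_distance citing_authors cited_authors graph max_depth)

-- ===== LEMMAS AND PROOFS =====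

-- A proof-side reference program: the level-synchronous form of A's BFS. A's queue loop is
-- first shown equal to it (via `lvl`), and it in turn equal to B's closure iteration.

/-- reference inner body: add `nb` to visited and to the next level if unseen -/
def refNbrAdd (s : PySem.Set String × List String) (nb : String) : PySem.Set String × List String :=
  if PySem.Set.contains s.1 nb then s else (PySem.Set.add s.1 nb, s.2 ++ [nb])

/-- reference frontier expansion -/
def refExp (graph : List (String × List String)) (s : PySem.Set String × List String)
    (f : List String) : PySem.Set String × List String :=
  f.foldl (fun s node => ((PySem.Dict.mk graph).getD node []).foldl refNbrAdd s) s

/-- reference level-synchronous loop -/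
def refLoop (cited : List String) (graph : List (String × List String)) (maxd : Int)
    (d : Int) (f : List String) (v : PySem.Set String) : Int :=
  if maxd + 1 ≤ d then maxd + 1
  else if f.any (fun n => cited.contains n) then d
  else if f.isEmpty then maxd + 1
  else refLoop cited graph maxd (d + 1) (refExp graph (v, []) f).2 (refExp graph (v, []) f).1
termination_by (maxd + 1 - d).toNat
decreasing_by omega

/-- accumulator lemma for the reference inner fold -/
lemma refFold_acc (ns : List String) (v : PySem.Set String) (acc : List String) :
    ns.foldl refNbrAdd (v, acc) =
      ((ns.foldl refNbrAdd (v, [])).1, acc ++ (ns.foldl refNbrAdd (v, [])).2) := by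
  induction ns generalizing v acc with
  | nil => simp
  | cons nb ns ih =>
    simp only [List.foldl_cons, refNbrAdd]
    rcases hc : PySem.Set.contains v nb with _ | _
    · simp only [Bool.false_eq_true, if_false, List.nil_append]
      rw [ih (PySem.Set.add v nb) (acc ++ [nb]), ih (PySem.Set.add v nb) [nb]]
      simp [List.append_assoc]
    · simp only [if_true]
      exact ih v acc

/-- accumulator lemma for the reference frontier expansion -/
lemma refOuter_acc (graph : List (String × List String)) (f : List String)
    (v : PySem.Set String) (acc : List String) :
    f.foldl (fun s node => ((PySem.Dict.mk graph).getD node []).foldl refNbrAdd s) (v, acc) =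
      ((f.foldl (fun s node => ((PySem.Dict.mk graph).getD node []).foldl refNbrAdd s) (v, [])).1,
       acc ++ (f.foldl (fun s node => ((PySem.Dict.mk graph).getD node []).foldl refNbrAdd s) (v, [])).2) := by
  induction f generalizing v acc with
  | nil => simp
  | cons c f ih =>
    simp only [List.foldl_cons]
    rcases hE : List.foldl refNbrAdd (v, []) ((PySem.Dict.mk graph).getD c []) with ⟨v1, a1⟩
    rw [refFold_acc ((PySem.Dict.mk graph).getD c []) v acc, hE]
    rw [ih v1 (acc ++ a1), ih v1 a1]
    simp [List.append_assoc]

/-- A's per-node expansion equals the reference one, with the new pairs appended at the queue's tail -/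
lemma aFold_eq_refFold (ns : List String) (d : Int) (q : List (String × Int)) (v : PySem.Set String) :
    ns.foldl (aNbrAdd d) (q, v) =
      (q ++ (ns.foldl refNbrAdd (v, [])).2.map (fun nb => (nb, d + 1)),
       (ns.foldl refNbrAdd (v, [])).1) := by
  induction ns generalizing q v with
  | nil => simp
  | cons nb ns ih =>
    simp only [List.foldl_cons, aNbrAdd, refNbrAdd]
    rcases hc : PySem.Set.contains v nb with _ | _
    · simp only [Bool.false_eq_true, if_false, List.nil_append]
      rw [ih (q ++ [(nb, d + 1)]) (PySem.Set.add v nb)]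
      rw [refFold_acc ns (PySem.Set.add v nb) [nb]]
      simp [List.append_assoc]
    · simp only [if_true]
      exact ih q v

lemma refFold_measure (U ns : List String) (v : PySem.Set String) (acc : List String)
    (hU : ∀ nb ∈ ns, nb ∈ U) :
    2 * ucount U ((ns.foldl refNbrAdd (v, acc)).1) + ((ns.foldl refNbrAdd (v, acc)).2).length ≤
      2 * ucount U v + acc.length := by
  induction ns generalizing v acc with
  | nil => simp
  | cons nb ns ih =>
    simp only [List.foldl_cons, refNbrAdd]
    rcases hc : PySem.Set.contains v nb with _ | _
    · simp only [Bool.false_eq_true, if_false]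
      have ih' := ih (PySem.Set.add v nb) (acc ++ [nb])
        (fun a ha => hU a (List.mem_cons_of_mem _ ha))
      have hlt := ucount_add_lt U v nb (hU nb List.mem_cons_self) hc
      simp only [List.length_append, List.length_cons, List.length_nil] at ih'
      omega
    · simp only [if_true]
      exact ih v acc (fun a ha => hU a (List.mem_cons_of_mem _ ha))

/-- intermediate description of A's queue states: `f` is the unprocessed rest of the current
depth-`d` level, `nf` the next level collected so far -/
def lvl (cited : List String) (graph : List (String × List String)) (maxd : Int)
    (d : Int) (f nf : List String) (v : PySem.Set String) : Int :=
  match f, nf with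
  | [], [] => maxd + 1
  | [], x :: nf' =>
    if d + 1 > maxd then maxd + 1 else lvl cited graph maxd (d + 1) (x :: nf') [] v
  | c :: f', nf =>
    if d > maxd then maxd + 1
    else if cited.contains c then d
    else
      lvl cited graph maxd d f'
        (nf ++ (((PySem.Dict.mk graph).getD c []).foldl refNbrAdd (v, [])).2)
        (((PySem.Dict.mk graph).getD c []).foldl refNbrAdd (v, [])).1
termination_by (2 * ucount ((graph.map Prod.snd).flatten) v + f.length + nf.length, (maxd + 1 - d).toNat)
decreasing_by
  · simp only [List.length_cons, List.length_nil, Nat.add_zero]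
    apply Prod.Lex.right
    omega
  · apply Prod.Lex.left
    have h := refFold_measure ((graph.map Prod.snd).flatten) ((PySem.Dict.mk graph).getD c []) v []
      (fun nb hnb => mem_getD_flatten graph c nb hnb)
    simp only [List.length_cons, List.length_append, List.length_nil] at *
    omega

lemma aLoop_eq_lvl (cited : List String) (graph : List (String × List String)) (maxd : Int)
    (d : Int) (f nf : List String) (v : PySem.Set String) :
    aLoop cited graph maxd
        (f.map (fun x => (x, d)) ++ nf.map (fun x => (x, d + 1))) v =
      lvl cited graph maxd d f nf v := by
  induction d, f, nf, v using lvl.induct cited graph maxd with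
  | case1 d v => simp [aLoop, lvl]
  | case2 d v x nf' hgt =>
    simp only [List.map_nil, List.nil_append, List.map_cons]
    rw [show aLoop cited graph maxd ((x, d + 1) :: List.map (fun x => (x, d + 1)) nf') v =
      maxd + 1 from by rw [aLoop]; rw [if_pos hgt]]
    simp [lvl, hgt]
  | case3 d v x nf' hgt ih =>
    simp only [List.map_nil, List.nil_append, List.map_cons] at ih ⊢
    simp only [List.append_nil] at ih
    rw [show lvl cited graph maxd d [] (x :: nf') v =
      lvl cited graph maxd (d + 1) (x :: nf') [] v from by simp [lvl, hgt]]
    exact ih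
  | case4 d v c f' nf hgt =>
    simp only [List.map_cons, List.cons_append]
    rw [aLoop, if_pos hgt]
    simp [lvl, hgt]
  | case5 d v c f' nf hgt hcc =>
    simp only [List.map_cons, List.cons_append]
    rw [aLoop, if_neg hgt, if_pos hcc]
    rw [lvl]
    rw [if_neg hgt, if_pos hcc]
  | case6 d v c f' nf hgt hcc ih =>
    simp only [List.map_cons, List.cons_append]
    rw [aLoop, if_neg hgt, if_neg hcc]
    rw [aFold_eq_refFold ((PySem.Dict.mk graph).getD c []) d
      (List.map (fun x => (x, d)) f' ++ List.map (fun x => (x, d + 1)) nf) v]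
    rw [show lvl cited graph maxd d (c :: f') nf v =
      lvl cited graph maxd d f'
        (nf ++ (((PySem.Dict.mk graph).getD c []).foldl refNbrAdd (v, [])).2)
        (((PySem.Dict.mk graph).getD c []).foldl refNbrAdd (v, [])).1 from by
      rw [lvl]; rw [if_neg hgt, if_neg hcc]]
    rw [← ih]
    simp [List.append_assoc, List.map_append]

lemma lvl_drain (cited : List String) (graph : List (String × List String)) (maxd : Int)
    (d : Int) (f nf : List String) (v : PySem.Set String) (hd : ¬ d > maxd) :
    lvl cited graph maxd d f nf v =
      if f.any (fun n => cited.contains n) then d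
      else lvl cited graph maxd d [] (nf ++ (refExp graph (v, []) f).2) (refExp graph (v, []) f).1 := by
  simp only [refExp]
  induction f generalizing nf v with
  | nil => simp
  | cons c f ih =>
    rw [show lvl cited graph maxd d (c :: f) nf v =
      if cited.contains c then d else
        lvl cited graph maxd d f
          (nf ++ (((PySem.Dict.mk graph).getD c []).foldl refNbrAdd (v, [])).2)
          (((PySem.Dict.mk graph).getD c []).foldl refNbrAdd (v, [])).1 from by
      rw [lvl, if_neg hd]]
    simp only [List.any_cons, List.foldl_cons]
    by_cases hcc : cited.contains c = true
    · rw [if_pos hcc, hcc, Bool.true_or]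
      simp
    · simp only [Bool.not_eq_true] at hcc
      rw [if_neg (by simpa using hcc), hcc, Bool.false_or]
      rcases hE : List.foldl refNbrAdd (v, []) ((PySem.Dict.mk graph).getD c []) with ⟨v1, a1⟩
      rw [ih (nf ++ a1) v1]
      rw [refOuter_acc graph f v1 a1]
      simp [List.append_assoc]

lemma refLoop_nil_frontier (cited : List String) (graph : List (String × List String)) (maxd : Int)
    (d : Int) (v : PySem.Set String) :
    refLoop cited graph maxd d [] v = maxd + 1 := by
  rw [refLoop]
  split <;> simp

lemma lvl_eq_refLoop (cited : List String) (graph : List (String × List String)) (maxd : Int)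
    (n : Nat) (d : Int) (f : List String) (v : PySem.Set String)
    (hn : (maxd + 1 - d).toNat = n) :
    lvl cited graph maxd d f [] v = refLoop cited graph maxd d f v := by
  induction n generalizing d f v with
  | zero =>
    have hd : maxd < d := by omega
    rw [refLoop, if_pos (by omega : maxd + 1 ≤ d)]
    cases f with
    | nil => simp [lvl]
    | cons c f' => simp [lvl, show d > maxd from hd]
  | succ n ihn =>
    have hd : d ≤ maxd := by omega
    rw [refLoop, if_neg (by omega : ¬ maxd + 1 ≤ d)]
    rw [lvl_drain cited graph maxd d f [] v (by omega)]
    by_cases ha : f.any (fun n => cited.contains n)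
    · rw [if_pos ha, if_pos ha]
    · simp only [ha, Bool.false_eq_true, if_false, List.nil_append]
      cases f with
      | nil => simp [lvl, refExp]
      | cons cf f' =>
      simp only [List.isEmpty_cons, Bool.false_eq_true, if_false]
      rcases hE : refExp graph (v, []) (cf :: f') with ⟨v1, a1⟩
      cases a1 with
      | nil => rw [refLoop_nil_frontier]; simp [lvl]
      | cons x l =>
        rw [show lvl cited graph maxd d [] (x :: l) v1 =
          if d + 1 > maxd then maxd + 1 else lvl cited graph maxd (d + 1) (x :: l) [] v1 from by
          rw [lvl]]
        by_cases hdm : d + 1 > maxd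
        · rw [if_pos hdm, refLoop, if_pos (by omega : maxd + 1 ≤ d + 1)]
        · rw [if_neg hdm]
          exact ihn (d + 1) (x :: l) v1 (by omega)

lemma init_fold (xs : List String) (q : List (String × Int)) (v : PySem.Set String) :
    xs.foldl (fun s a => (s.1 ++ [(a, (0 : Int))], PySem.Set.add s.2 a)) (q, v) =
      (q ++ xs.map (fun a => (a, (0 : Int))), xs.foldl PySem.Set.add v) := by
  induction xs generalizing q v with
  | nil => simp
  | cons a xs ih =>
    simp only [List.foldl_cons, List.map_cons]
    rw [ih]
    simp

-- ===== membership characterisations =====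

lemma mem_refFold (ns : List String) (v : PySem.Set String) (acc : List String) (x : String) :
    (x ∈ (ns.foldl refNbrAdd (v, acc)).1 ↔ x ∈ v ∨ x ∈ ns) ∧
    (x ∈ (ns.foldl refNbrAdd (v, acc)).2 ↔ x ∈ acc ∨ (x ∈ ns ∧ x ∉ v)) := by
  induction ns generalizing v acc with
  | nil => simp
  | cons nb ns ih =>
    simp only [List.foldl_cons, refNbrAdd]
    rcases hc : PySem.Set.contains v nb with _ | _
    · have hnb : nb ∉ v := fun h => by
        rw [(PySem.Set.contains_iff v nb).mpr h] at hc
        exact Bool.noConfusion hc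
      simp only [Bool.false_eq_true, if_false]
      obtain ⟨h1, h2⟩ := ih (PySem.Set.add v nb) (acc ++ [nb])
      constructor
      · rw [h1, PySem.Set.mem_add]
        simp only [List.mem_cons]
        tauto
      · rw [h2, PySem.Set.mem_add]
        simp only [List.mem_append, List.mem_cons, List.not_mem_nil, or_false]
        constructor
        · rintro ((h | rfl) | ⟨h, h'⟩)
          · exact Or.inl h
          · exact Or.inr ⟨Or.inl rfl, hnb⟩
          · exact Or.inr ⟨Or.inr h, fun hv => h' (Or.inl hv)⟩
        · rintro (h | ⟨(rfl | h), h'⟩)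
          · exact Or.inl (Or.inl h)
          · exact Or.inl (Or.inr rfl)
          · by_cases hx : x = nb
            · exact Or.inl (Or.inr hx)
            · exact Or.inr ⟨h, fun hv => hv.elim h' hx⟩
    · have hnb : nb ∈ v := (PySem.Set.contains_iff v nb).mp hc
      simp only [if_true]
      obtain ⟨h1, h2⟩ := ih v acc
      constructor
      · rw [h1]
        simp only [List.mem_cons]
        constructor
        · rintro (h | h) <;> tauto
        · rintro (h | rfl | h)
          · tauto
          · exact Or.inl hnb
          · tauto
      · rw [h2]
        simp only [List.mem_cons]
        constructor
        · rintro (h | ⟨h, h'⟩) <;> tauto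
        · rintro (h | ⟨(rfl | h), h'⟩)
          · tauto
          · exact absurd hnb h'
          · tauto

lemma mem_refExp (graph : List (String × List String)) (f : List String)
    (v : PySem.Set String) (acc : List String) (x : String) :
    (x ∈ (refExp graph (v, acc) f).1 ↔
        x ∈ v ∨ ∃ c ∈ f, x ∈ (PySem.Dict.mk graph).getD c []) ∧
    (x ∈ (refExp graph (v, acc) f).2 ↔
        x ∈ acc ∨ ((∃ c ∈ f, x ∈ (PySem.Dict.mk graph).getD c []) ∧ x ∉ v)) := by
  induction f generalizing v acc with
  | nil => simp [refExp]
  | cons c f ih =>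
    have hstep : refExp graph (v, acc) (c :: f) =
        refExp graph (List.foldl refNbrAdd (v, acc) ((PySem.Dict.mk graph).getD c [])) f := rfl
    rw [hstep]
    have hm := mem_refFold ((PySem.Dict.mk graph).getD c []) v acc x
    generalize hg : List.foldl refNbrAdd (v, acc) ((PySem.Dict.mk graph).getD c []) = q at hm ⊢
    obtain ⟨v1, a1⟩ := q
    obtain ⟨hm1, hm2⟩ := hm
    dsimp only at hm1 hm2
    obtain ⟨h1, h2⟩ := ih v1 a1
    constructor
    · rw [h1, hm1]
      constructor
      · rintro ((h | h) | ⟨c', hc', h⟩)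
        · exact Or.inl h
        · exact Or.inr ⟨c, List.mem_cons_self, h⟩
        · exact Or.inr ⟨c', List.mem_cons_of_mem _ hc', h⟩
      · rintro (h | ⟨c', hc', h⟩)
        · exact Or.inl (Or.inl h)
        · rcases List.mem_cons.mp hc' with rfl | hc''
          · exact Or.inl (Or.inr h)
          · exact Or.inr ⟨c', hc'', h⟩
    · rw [h2, hm2, hm1]
      constructor
      · rintro ((h | ⟨h, hv⟩) | ⟨⟨c', hc', h⟩, hnv⟩)
        · exact Or.inl h
        · exact Or.inr ⟨⟨c, List.mem_cons_self, h⟩, hv⟩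
        · exact Or.inr ⟨⟨c', List.mem_cons_of_mem _ hc', h⟩, fun hv => hnv (Or.inl hv)⟩
      · rintro (h | ⟨⟨c', hc', h⟩, hv⟩)
        · exact Or.inl (Or.inl h)
        · rcases List.mem_cons.mp hc' with rfl | hc''
          · exact Or.inl (Or.inr ⟨h, hv⟩)
          · by_cases hDc : x ∈ (PySem.Dict.mk graph).getD c []
            · exact Or.inl (Or.inr ⟨hDc, hv⟩)
            · exact Or.inr ⟨⟨c', hc'', h⟩, fun hor => hor.elim hv hDc⟩

lemma mem_bNbrs (graph : List (String × List String)) (R : PySem.Set String) (x : String) :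
    x ∈ bNbrs graph R ↔ ∃ c ∈ R, x ∈ (PySem.Dict.mk graph).getD c [] := by
  unfold bNbrs
  suffices h : ∀ (S : PySem.Set String),
      x ∈ R.foldl (fun S node => PySem.Set.update S ((PySem.Dict.mk graph).getD node [])) S ↔
        x ∈ S ∨ ∃ c ∈ R, x ∈ (PySem.Dict.mk graph).getD c [] by
    rw [h PySem.Set.empty]
    simp [PySem.Set.empty]
  induction R with
  | nil => simp
  | cons c R ih =>
    intro S
    simp only [List.foldl_cons]
    rw [ih, PySem.Set.mem_update]
    simp only [List.mem_cons, exists_eq_or_imp]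
    tauto

lemma mem_bStep (graph : List (String × List String)) (R : PySem.Set String) (x : String) :
    x ∈ PySem.Set.union R (bNbrs graph R) ↔
      x ∈ R ∨ ∃ c ∈ R, x ∈ (PySem.Dict.mk graph).getD c [] := by
  rw [PySem.Set.mem_union, mem_bNbrs]

lemma inter_empty_iff (R cited : List String) :
    (PySem.Set.inter R cited).isEmpty = true ↔ ∀ x ∈ R, cited.contains x = false := by
  rw [List.isEmpty_iff, List.eq_nil_iff_forall_not_mem]
  constructor
  · intro h x hx
    rcases hc : cited.contains x with _ | _
    · rfl
    · exact absurd ((PySem.Set.mem_inter R cited x).mpr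
        ⟨hx, by simpa using hc⟩) (h x)
  · intro h x hx
    rw [PySem.Set.mem_inter] at hx
    have := h x hx.1
    simp only [List.contains_eq_mem, decide_eq_false_iff_not] at this
    exact this hx.2

/-- the bridge: the level-synchronous reference loop equals B's closure loop, under the
invariant that `R` and `v` have the same members, `f ⊆ v`, and every visited node outside
the current frontier is already checked (not cited) and fully expanded -/
lemma ref_eq_b (cited : List String) (graph : List (String × List String)) (maxd : Int)
    (n : Nat) (d : Int) (f : List String) (v R : PySem.Set String)
    (hn : (maxd + 1 - d).toNat = n)
    (h1 : ∀ x, x ∈ R ↔ x ∈ v)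
    (h4 : ∀ x ∈ f, x ∈ v)
    (h2 : ∀ x ∈ v, x ∉ f → cited.contains x = false)
    (h3 : ∀ x ∈ v, x ∉ f → ∀ nb ∈ (PySem.Dict.mk graph).getD x [], nb ∈ v) :
    refLoop cited graph maxd d f v = bLoop cited graph maxd d R := by
  induction n generalizing d f v R with
  | zero =>
    rw [refLoop, if_pos (by omega : maxd + 1 ≤ d),
      bLoop, if_pos (by omega : maxd + 1 ≤ d)]
  | succ n ihn =>
    rw [refLoop, if_neg (by omega : ¬ maxd + 1 ≤ d),
      bLoop, if_neg (by omega : ¬ maxd + 1 ≤ d)]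
    by_cases hhit : f.any (fun x => cited.contains x) = true
    · -- some frontier node is cited: both return d
      rw [if_pos hhit]
      obtain ⟨x, hxf, hxc⟩ := List.any_eq_true.mp hhit
      have hne : (PySem.Set.inter R cited).isEmpty = false := by
        rcases he : (PySem.Set.inter R cited).isEmpty with _ | _
        · rfl
        · have hfalse := (inter_empty_iff R cited).mp he x ((h1 x).mpr (h4 x hxf))
          rw [hxc] at hfalse
          exact Bool.noConfusion hfalse
      rw [hne]
      simp
    · -- no frontier node is cited ⇒ no reach node is cited
      simp only [Bool.not_eq_true] at hhit
      have hnof : ∀ x ∈ f, cited.contains x = false := by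
        intro x hx
        have := List.any_eq_false.mp hhit x hx
        simpa using this
      have hnoR : ∀ x ∈ R, cited.contains x = false := by
        intro x hx
        by_cases hxf : x ∈ f
        · exact hnof x hxf
        · exact h2 x ((h1 x).mp hx) hxf
      rw [if_pos ((inter_empty_iff R cited).mpr hnoR), hhit]
      simp only [Bool.false_eq_true, if_false]
      cases f with
      | nil =>
        -- reference breaks on an empty frontier; B's set is closed, so the fixpoint fires
        simp only [List.isEmpty_nil, if_true]
        have hclosed : ∀ x ∈ R, ∀ nb ∈ (PySem.Dict.mk graph).getD x [], nb ∈ R :=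
          fun x hx nb hnb => (h1 nb).mpr (h3 x ((h1 x).mp hx) (by simp) nb hnb)
        rw [if_pos ((PySem.Set.equal_iff _ _).mpr (fun x => ⟨fun hx => by
          rcases (mem_bStep graph R x).mp hx with h | ⟨c, hcR, hx'⟩
          · exact h
          · exact hclosed c hcR x hx',
          fun hx => (mem_bStep graph R x).mpr (Or.inl hx)⟩))]
      | cons c0 f0 =>
        simp only [List.isEmpty_cons, Bool.false_eq_true, if_false]
        have hmv : ∀ x, x ∈ (refExp graph (v, []) (c0 :: f0)).1 ↔
            x ∈ v ∨ ∃ c ∈ c0 :: f0, x ∈ (PySem.Dict.mk graph).getD c [] :=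
          fun x => (mem_refExp graph (c0 :: f0) v [] x).1
        have hmf : ∀ x, x ∈ (refExp graph (v, []) (c0 :: f0)).2 ↔
            (∃ c ∈ c0 :: f0, x ∈ (PySem.Dict.mk graph).getD c []) ∧ x ∉ v :=
          fun x => by
            have := (mem_refExp graph (c0 :: f0) v [] x).2
            simpa using this
        by_cases heq : PySem.Set.equal (PySem.Set.union R (bNbrs graph R)) R = true
        · -- B has reached its fixpoint: the next reference frontier is empty
          rw [if_pos heq]
          have hEq := (PySem.Set.equal_iff _ _).mp heq
          have hf' : (refExp graph (v, []) (c0 :: f0)).2 = [] := by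
            rw [List.eq_nil_iff_forall_not_mem]
            intro x hx
            obtain ⟨⟨c, hcf, hxN⟩, hxv⟩ := (hmf x).mp hx
            exact hxv ((h1 x).mp ((hEq x).mp ((mem_bStep graph R x).mpr
              (Or.inr ⟨c, (h1 c).mpr (h4 c hcf), hxN⟩))))
          rw [hf', refLoop_nil_frontier]
        · rw [if_neg heq]
          apply ihn (d + 1) _ _ _ (by omega)
          · -- h1'
            intro x
            rw [mem_bStep, hmv]
            constructor
            · rintro (hx | ⟨c, hcR, hxN⟩)
              · exact Or.inl ((h1 x).mp hx)
              · by_cases hcf : c ∈ c0 :: f0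
                · exact Or.inr ⟨c, hcf, hxN⟩
                · exact Or.inl (h3 c ((h1 c).mp hcR) hcf x hxN)
            · rintro (hx | ⟨c, hcf, hxN⟩)
              · exact Or.inl ((h1 x).mpr hx)
              · exact Or.inr ⟨c, (h1 c).mpr (h4 c hcf), hxN⟩
          · -- h4'
            intro x hx
            rw [hmv]
            exact Or.inr ((hmf x).mp hx).1
          · -- h2'
            intro x hx hxnf
            rcases (hmv x).mp hx with hxv | hxN
            · by_cases hxf : x ∈ c0 :: f0
              · exact hnof x hxf
              · exact h2 x hxv hxf
            · by_cases hxv : x ∈ v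
              · by_cases hxf : x ∈ c0 :: f0
                · exact hnof x hxf
                · exact h2 x hxv hxf
              · exact absurd ((hmf x).mpr ⟨hxN, hxv⟩) hxnf
          · -- h3'
            intro x hx hxnf nb hnb
            rw [hmv]
            rcases (hmv x).mp hx with hxv | hxN
            · by_cases hxf : x ∈ c0 :: f0
              · exact Or.inr ⟨x, hxf, hnb⟩
              · exact Or.inl (h3 x hxv hxf nb hnb)
            · by_cases hxv : x ∈ v
              · by_cases hxf : x ∈ c0 :: f0
                · exact Or.inr ⟨x, hxf, hnb⟩
                · exact Or.inl (h3 x hxv hxf nb hnb)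
              · exact absurd ((hmf x).mpr ⟨hxN, hxv⟩) hxnf

-- ===== VERDICT (by name: the statement is the Claim_ definition above) =====
theorem min_coauthor_distance_spec : Claim_equal_min_coauthor_distance := by
  intro citing cited graph maxd _
  unfold Spec_min_coauthor_distance min_coauthor_distance min_coauthor_distance_alt
  rw [init_fold]
  have h1 := aLoop_eq_lvl cited graph maxd 0 citing [] (PySem.Set.ofList citing)
  have h2 := lvl_eq_refLoop cited graph maxd ((maxd + 1 - 0).toNat) 0 citing
    (PySem.Set.ofList citing) rfl
  have h3 := ref_eq_b cited graph maxd ((maxd + 1 - 0).toNat) 0 citing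
    (PySem.Set.ofList citing) (PySem.Set.ofList citing) rfl
    (fun x => Iff.rfl)
    (fun x hx => (PySem.Set.mem_ofList citing x).mpr hx)
    (fun x hx hxf => absurd ((PySem.Set.mem_ofList citing x).mp hx) hxf)
    (fun x hx hxf => absurd ((PySem.Set.mem_ofList citing x).mp hx) hxf)
  simp only [List.map_nil, List.append_nil] at h1
  rw [PySem.Set.ofList_eq_foldl] at h1 h2 h3
  rw [show (PySem.Set.empty : PySem.Set String) = ([] : PySem.Set String) from rfl,
    PySem.Set.ofList_eq_foldl]
  exact (h1.trans h2).trans h3
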